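-- pv_equiv track=rewrite | github.com/Aasthaengg/IBMdataset | Python_codes/p03739/s120080393.py | calc
-- ===== SOURCE A (Python) =====
-- def calc(sign, A):
--     cumsum_A = [0 for _ in range(len(A))]
--     cumsum_A[0] = A[0]
--     for i in range(len(cumsum_A) - 1):
--         cumsum_A[i + 1] = cumsum_A[i] + A[i + 1]
--     ret, offset = 0, 0
--     for a in cumsum_A:
--         b = a + offset
--         if sign * b <= 0:
--             diff = sign - b
--             offset += diff
--             ret += abs(diff)
--         sign *= (-1)
--     return ret
-- ===== SOURCE B (Python) =====
-- def calc(sign, A):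
--     # Consume the input destructively as a stack: the current adjusted value is
--     # folded into the next element pulled off the stack, so there is no
--     # prefix-sum array, no offset accumulator and no running total.
--     a, stack = A[0], A[1:]
--     stack.reverse()          # pop() now yields A[1], A[2], ... in order
--     cost = 0
--     while True:
--         if sign * a <= 0:
--             cost += abs(sign - a)
--             a = sign
--         if not stack:
--             return cost
--         a += stack.pop()
--         sign = -sign
-- ===== Notes on version B (the rewrite author's own statement) =====
-- stated objective: alternative
-- what changed: B discards A's precomputed cumulative-sum array and offset accumulator: it consumes the input destructively as a stack, folding the already-adjusted value into the next element popped, so the problem instance itself is rewritten instead of tracking corrections in a separate accumulator.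
import Mathlib
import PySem

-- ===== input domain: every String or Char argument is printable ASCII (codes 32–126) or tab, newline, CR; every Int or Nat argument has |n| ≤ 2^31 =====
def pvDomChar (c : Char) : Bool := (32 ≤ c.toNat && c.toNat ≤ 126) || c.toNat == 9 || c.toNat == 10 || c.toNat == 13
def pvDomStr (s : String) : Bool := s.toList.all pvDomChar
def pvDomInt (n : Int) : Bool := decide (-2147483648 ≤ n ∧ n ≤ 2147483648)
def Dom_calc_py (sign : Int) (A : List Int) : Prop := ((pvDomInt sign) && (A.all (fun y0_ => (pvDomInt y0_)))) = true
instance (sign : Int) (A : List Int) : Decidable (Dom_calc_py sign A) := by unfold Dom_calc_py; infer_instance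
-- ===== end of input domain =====

-- B replaces A's precomputed cumulative-sum array and offset accumulator by a loop that
-- consumes the input as a stack, folding the adjusted value into the next element popped
-- (objective: alternative decomposition, same cost). B mutates its local copy A[1:] only.

-- ===== PORT A =====
-- one iteration of A's second loop: state (ret, offset, sign), element a of cumsum_A
def pvStepA (st : Int × Int × Int) (a : Int) : Int × Int × Int :=
  let b := a + st.2.1
  if st.2.2 * b ≤ 0 then (st.1 + |st.2.2 - b|, st.2.1 + (st.2.2 - b), st.2.2 * (-1))
  else (st.1, st.2.1, st.2.2 * (-1))

-- one iteration of A's cumsum loop: cumsum_A[i+1] = cumsum_A[i] + A[i+1]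
def pvCumStep (A : List Int) (c : List Int) (i : Nat) : List Int :=
  c.set (i + 1) (c.getD i 0 + A.getD (i + 1) 0)

def calc_py (sign : Int) (A : List Int) : Int :=
  -- cumsum_A = [0]*len(A); cumsum_A[0] = A[0]  (A[0] raises on []; excluded by Pre_)
  let cum1 := (List.replicate A.length 0).set 0 (A.getD 0 0)
  let cum := (List.range (A.length - 1)).foldl (pvCumStep A) cum1
  (cum.foldl pvStepA (0, 0, sign)).1

-- ===== PORT B =====
-- B's while-loop. Source B keeps `stack = A[1:]` REVERSED and `stack.pop()` pops its LAST
-- element, i.e. it consumes A[1], A[2], … front-to-back; the port carries the stack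
-- contents in that consumption order (head = next pop), which is exact.
def pvLoopB (sign a cost : Int) (stack : List Int) : Int :=
  let p := if sign * a ≤ 0 then (cost + |sign - a|, sign) else (cost, a)
  match stack with
  | [] => p.1
  | x :: rest => pvLoopB (-sign) (p.2 + x) p.1 rest

def calc_py_alt (sign : Int) (A : List Int) : Int :=
  match A with
  | [] => 0          -- unreachable: A[0] raises IndexError in Source B; [] is outside Pre_
  | a :: rest => pvLoopB sign a 0 rest

-- ===== PRECONDITION & SPEC =====
-- Both A and B raise IndexError on the empty list (A[0]); Pre_ excludes exactly that.
def Pre_calc_py (sign : Int) (A : List Int) : Prop := A ≠ []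
instance (sign : Int) (A : List Int) : Decidable (Pre_calc_py sign A) := by unfold Pre_calc_py; infer_instance
def pvWitness_calc_py : Int × List Int := (1, [1])

def Spec_calc_py (sign : Int) (A : List Int) (out : Int) : Prop := out = calc_py_alt sign A
instance (sign : Int) (A : List Int) (out : Int) : Decidable (Spec_calc_py sign A out) := by unfold Spec_calc_py; infer_instance

-- ===== CLAIM (what is proved, stated in full; the proofs are below) =====
def Claim_equal_calc_py : Prop := ∀ (sign : Int) (A : List Int), Dom_calc_py sign A → Pre_calc_py sign A → Spec_calc_py sign A (calc_py sign A)

-- ===== LEMMAS AND PROOFS =====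

-- prefix sums of a list starting from accumulated value c (what A's first loop builds)
def pref (c : Int) : List Int → List Int
  | [] => []
  | a :: t => (c + a) :: pref (c + a) t

theorem pref_length (c : Int) (L : List Int) : (pref c L).length = L.length := by
  induction L generalizing c with
  | nil => rfl
  | cons a t ih => simp [pref, ih]

theorem pref_getD (c : Int) (L : List Int) (i : Nat) (h : i < L.length) :
    (pref c L).getD i 0 = c + (L.take (i + 1)).sum := by
  induction L generalizing c i with
  | nil => simp at h
  | cons a t ih =>
    cases i with
    | zero => simp [pref]
    | succ i =>
      simp only [pref, List.getD_cons_succ, List.take_succ_cons, List.sum_cons]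
      rw [ih (c + a) i (by simpa using h)]
      ring

theorem pref_snoc (c : Int) (L : List Int) (x : Int) :
    pref c (L ++ [x]) = pref c L ++ [c + L.sum + x] := by
  induction L generalizing c with
  | nil => simp [pref]
  | cons a t ih => simp [pref, ih (c + a)]; ring_nf

-- invariant of A's cumsum-building loop over a :: t
theorem build_inv (a : Int) (t : List Int) (j : Nat) (hj : j ≤ t.length) :
    (List.range j).foldl (pvCumStep (a :: t)) (a :: List.replicate t.length 0)
      = pref 0 ((a :: t).take (j + 1)) ++ List.replicate (t.length - j) 0 := by
  induction j with
  | zero => simp [pref]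
  | succ j ih =>
    have hj' : j ≤ t.length := Nat.le_of_succ_le hj
    have hjlt : j < t.length := hj
    rw [List.range_succ, List.foldl_append, ih hj']
    simp only [List.foldl_cons, List.foldl_nil, pvCumStep]
    have htlen : ((a :: t).take (j + 1)).length = j + 1 := by
      simp [List.length_take]; omega
    have hplen : (pref 0 ((a :: t).take (j + 1))).length = j + 1 := by
      rw [pref_length, htlen]
    have hread : (pref 0 ((a :: t).take (j + 1)) ++ List.replicate (t.length - j) 0).getD j 0
        = ((a :: t).take (j + 1)).sum := by
      rw [List.getD_append _ _ _ _ (by omega)]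
      rw [pref_getD 0 _ j (by omega)]
      rw [List.take_take]
      simp
    rw [hread]
    have hset : ∀ (v : Int),
        (pref 0 ((a :: t).take (j + 1)) ++ List.replicate (t.length - j) 0).set (j + 1) v
          = pref 0 ((a :: t).take (j + 1)) ++ (v :: List.replicate (t.length - (j + 1)) 0) := by
      intro v
      rw [List.set_append_right _ _ (by omega)]
      have : t.length - j = (t.length - (j + 1)) + 1 := by omega
      rw [hplen, this]
      simp [List.replicate_succ]
    rw [hset]
    have hel : j + 1 < (a :: t).length := by simp; omega
    have htake : (a :: t).take (j + 2) = (a :: t).take (j + 1) ++ [(a :: t).getD (j + 1) 0] := by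
      rw [List.take_add_one, List.getD_eq_getElem _ _ hel]
      simp [List.getElem?_eq_getElem hel]
    rw [htake, pref_snoc]
    simp

theorem build_eq (a : Int) (t : List Int) :
    (List.range ((a :: t).length - 1)).foldl (pvCumStep (a :: t))
        ((List.replicate (a :: t).length 0).set 0 ((a :: t).getD 0 0))
      = pref 0 (a :: t) := by
  have h0 : ((List.replicate (a :: t).length 0).set 0 ((a :: t).getD 0 0))
      = a :: List.replicate t.length 0 := by
    simp [List.replicate_succ]
  rw [h0]
  have := build_inv a t t.length (le_refl _)
  simpa using this

-- A's fold over the prefix sums with an offset equals B's stack-consuming loop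
theorem fold_eq_loop (t : List Int) : ∀ (a c ret off sg : Int),
    ((pref c (a :: t)).foldl pvStepA (ret, off, sg)).1
      = pvLoopB sg (c + off + a) ret t := by
  induction t with
  | nil =>
    intro a c ret off sg
    simp only [pref, List.foldl_cons, List.foldl_nil, pvStepA, pvLoopB]
    have h : c + a + off = c + off + a := by ring
    rw [h]
    split_ifs <;> simp
  | cons x rest ih =>
    intro a c ret off sg
    have h : c + a + off = c + off + a := by ring
    rw [show pref c (a :: x :: rest) = (c + a) :: pref (c + a) (x :: rest) from rfl,
        List.foldl_cons, pvLoopB]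
    simp only [pvStepA, h]
    by_cases hb : sg * (c + off + a) ≤ 0
    · rw [if_pos hb, if_pos hb]
      simp only
      rw [ih x (c + a) (ret + |sg - (c + off + a)|) (off + (sg - (c + off + a))) (sg * (-1))]
      have e1 : c + a + (off + (sg - (c + off + a))) + x = sg + x := by ring
      have e2 : sg * (-1) = -sg := by ring
      rw [e1, e2]
    · rw [if_neg hb, if_neg hb]
      simp only
      rw [ih x (c + a) ret off (sg * (-1))]
      have e1 : c + a + off + x = c + off + a + x := by ring
      have e2 : sg * (-1) = -sg := by ring
      rw [e1, e2]

-- ===== VERDICT (by name: the statement is the Claim_ definition above) =====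
theorem calc_py_spec : Claim_equal_calc_py := by
  intro sign A _ hpre
  unfold Spec_calc_py
  cases A with
  | nil => exact absurd rfl hpre
  | cons a t =>
    show (((List.range ((a :: t).length - 1)).foldl (pvCumStep (a :: t))
        ((List.replicate (a :: t).length 0).set 0 ((a :: t).getD 0 0))).foldl
          pvStepA (0, 0, sign)).1 = calc_py_alt sign (a :: t)
    rw [build_eq a t]
    unfold calc_py_alt
    have := fold_eq_loop t a 0 0 0 sign
    simpa using this
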